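-- pv_equiv track=rewrite | github.com/vsemenyakin/Space | _/python/utils/osint_stringUtils.py | batchStringEscaping_forString
-- ===== SOURCE A (Python) =====
-- def batchStringEscaping_forString(string, escapeOnlyThisSymbols = None):
--
--   resultString = ""
--
--   percentEscapedSymbols = "%"
--
--   for char in string:
--     if escapeOnlyThisSymbols != None and (not char in escapeOnlyThisSymbols):
--       resultString = resultString + char
--     elif char in percentEscapedSymbols:
--       resultString = resultString + "%" + char
--     else:
--       resultString = resultString + char
--
--   return resultString
-- ===== SOURCE B (Python) =====
-- def batchStringEscaping_forString(string, escapeOnlyThisSymbols = None):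
--   shouldEscapePercent = escapeOnlyThisSymbols is None or "%" in escapeOnlyThisSymbols
--   if shouldEscapePercent:
--     return string.replace("%", "%%")
--   return string
-- ===== Notes on version B (the rewrite author's own statement) =====
-- stated objective: faster
-- what changed: Only the percent character is ever escaped, so the per-character accumulator loop collapses to one membership guard plus a single str.replace call, removing A's quadratic string concatenation.
import Mathlib
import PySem

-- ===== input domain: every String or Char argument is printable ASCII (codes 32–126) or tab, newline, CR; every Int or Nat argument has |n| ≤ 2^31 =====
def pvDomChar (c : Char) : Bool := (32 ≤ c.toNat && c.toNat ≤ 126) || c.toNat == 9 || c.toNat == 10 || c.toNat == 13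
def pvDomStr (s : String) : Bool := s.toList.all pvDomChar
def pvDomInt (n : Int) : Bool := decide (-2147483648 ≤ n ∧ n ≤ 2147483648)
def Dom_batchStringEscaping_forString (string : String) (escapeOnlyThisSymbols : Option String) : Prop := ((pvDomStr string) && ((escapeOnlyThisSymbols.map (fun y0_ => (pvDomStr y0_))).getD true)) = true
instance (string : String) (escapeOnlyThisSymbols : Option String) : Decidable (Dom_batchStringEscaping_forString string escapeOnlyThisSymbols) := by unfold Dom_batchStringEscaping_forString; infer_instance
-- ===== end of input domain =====

-- B collapses A's per-character accumulator loop to a single replace("%","%%") call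
-- guarded by one membership test (idiomatic; only '%' is ever escaped).


-- ===== PORT A =====
-- one loop step: the three branches of A, in order
def pvStepA (escapeOnlyThisSymbols : Option String) (acc : List Char) (c : Char) : List Char :=
  if escapeOnlyThisSymbols ≠ none ∧ c ∉ (escapeOnlyThisSymbols.getD "").toList then acc ++ [c]
  else if c ∈ "%".toList then acc ++ ['%', c]
  else acc ++ [c]

def batchStringEscaping_forString (string : String) (escapeOnlyThisSymbols : Option String) : String :=
  String.ofList (string.toList.foldl (pvStepA escapeOnlyThisSymbols) [])

-- ===== PORT B =====
def batchStringEscaping_forString_alt (string : String) (escapeOnlyThisSymbols : Option String) : String :=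
  let shouldEscapePercent : Bool :=
    escapeOnlyThisSymbols.isNone || decide ('%' ∈ (escapeOnlyThisSymbols.getD "").toList)
  if shouldEscapePercent then PySem.Str.replace string "%" "%%" else string

-- ===== PRECONDITION & SPEC =====
def Spec_batchStringEscaping_forString (string : String) (escapeOnlyThisSymbols : Option String) (out : String) : Prop := out = batchStringEscaping_forString_alt string escapeOnlyThisSymbols
instance (string : String) (escapeOnlyThisSymbols : Option String) (out : String) : Decidable (Spec_batchStringEscaping_forString string escapeOnlyThisSymbols out) := by unfold Spec_batchStringEscaping_forString; infer_instance

-- ===== CLAIM (what is proved, stated in full; the proofs are below) =====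
def Claim_equal_batchStringEscaping_forString : Prop := ∀ (string : String) (escapeOnlyThisSymbols : Option String), Dom_batchStringEscaping_forString string escapeOnlyThisSymbols → Spec_batchStringEscaping_forString string escapeOnlyThisSymbols (batchStringEscaping_forString string escapeOnlyThisSymbols)

-- ===== LEMMAS AND PROOFS =====

-- the chunk A appends for one character
def pvChunkA (escapeOnlyThisSymbols : Option String) (c : Char) : List Char :=
  if escapeOnlyThisSymbols ≠ none ∧ c ∉ (escapeOnlyThisSymbols.getD "").toList then [c]
  else if c ∈ "%".toList then ['%', c]
  else [c]

theorem pvStepA_eq (escapeOnlyThisSymbols : Option String) (acc : List Char) (c : Char) :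
    pvStepA escapeOnlyThisSymbols acc c = acc ++ pvChunkA escapeOnlyThisSymbols c := by
  unfold pvStepA pvChunkA; split_ifs <;> rfl

theorem pvFoldA (escapeOnlyThisSymbols : Option String) (cs : List Char) (acc : List Char) :
    cs.foldl (pvStepA escapeOnlyThisSymbols) acc = acc ++ cs.flatMap (pvChunkA escapeOnlyThisSymbols) := by
  induction cs generalizing acc with
  | nil => simp
  | cons c t ih => simp [pvStepA_eq, ih]

def pvEsc (c : Char) : List Char := if c = '%' then ['%', '%'] else [c]

theorem pvReplaceGo (cs : List Char) (fuel : Nat) (acc : List Char) (h : cs.length ≤ fuel) :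
    PySem.Chars.replace.go ['%'] ['%', '%'] fuel cs acc = acc.reverse ++ cs.flatMap pvEsc := by
  induction cs generalizing fuel acc with
  | nil => cases fuel <;> simp [PySem.Chars.replace.go]
  | cons c t ih =>
    cases fuel with
    | zero => simp at h
    | succ n =>
      have ht : t.length ≤ n := by simp at h; omega
      simp only [PySem.Chars.replace.go]
      by_cases hc : c = '%'
      · subst hc
        rw [if_pos (by simp [List.isPrefixOf])]
        rw [show List.drop (['%'].length) ('%' :: t) = t from by simp]
        rw [ih n _ ht]
        simp [pvEsc]
      · have hnp : ¬ (List.isPrefixOf ['%'] (c :: t) = true) := by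
          simp only [List.isPrefixOf, Bool.and_eq_true, beq_iff_eq]
          exact fun hh => hc hh.1.symm
        rw [if_neg hnp]
        rw [ih n _ ht]
        simp [pvEsc, hc]

theorem pvReplaceEq (cs : List Char) :
    PySem.Chars.replace cs ['%'] ['%', '%'] = cs.flatMap pvEsc := by
  unfold PySem.Chars.replace
  rw [if_neg (by decide)]
  simpa using pvReplaceGo cs cs.length [] le_rfl

theorem pvChunkA_none (c : Char) : pvChunkA none c = pvEsc c := by
  unfold pvChunkA pvEsc
  by_cases hc : c = '%' <;> simp [hc]

theorem pvChunkA_some_mem (es : String) (hp : '%' ∈ es.toList) (c : Char) :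
    pvChunkA (some es) c = pvEsc c := by
  unfold pvChunkA pvEsc
  by_cases hc : c = '%'
  · subst hc; simp [hp]
  · simp [hc]

-- ===== VERDICT (by name: the statement is the Claim_ definition above) =====
theorem batchStringEscaping_forString_spec : Claim_equal_batchStringEscaping_forString := by
  intro s esc _
  unfold Spec_batchStringEscaping_forString batchStringEscaping_forString batchStringEscaping_forString_alt
  rw [pvFoldA]
  cases esc with
  | none =>
    simp only [Option.isNone_none, Bool.true_or, if_true, PySem.Str.replace,
      show ("%" : String).toList = ['%'] from by decide,
      show ("%%" : String).toList = ['%', '%'] from by decide, pvReplaceEq, List.nil_append]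
    congr 1
    exact List.flatMap_congr (fun c _ => pvChunkA_none c)
  | some es =>
    simp only [Option.isNone_some, Bool.false_or, Option.getD_some, List.nil_append]
    by_cases hp : '%' ∈ es.toList
    · rw [if_pos (by simpa using hp)]
      simp only [PySem.Str.replace, show ("%" : String).toList = ['%'] from by decide,
        show ("%%" : String).toList = ['%', '%'] from by decide, pvReplaceEq]
      congr 1
      exact List.flatMap_congr (fun c _ => pvChunkA_some_mem es hp c)
    · rw [if_neg (by simpa using hp)]
      have hflat : s.toList.flatMap (pvChunkA (some es)) = s.toList := by
        have hch : ∀ c, pvChunkA (some es) c = [c] := by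
          intro c
          unfold pvChunkA
          by_cases hc : c ∈ es.toList
          · have hcp : c ≠ '%' := fun h => hp (h ▸ hc)
            simp [hc, hcp]
          · simp [hc]
        rw [show pvChunkA (some es) = fun c => [c] from funext hch]
        simp
      rw [hflat]
      exact String.ofList_toList
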